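-- pv_equiv track=rewrite | github.com/mmercalde/prng_cluster_public | pa_sieve_validation_harness.py | java_lcg_forward
-- ===== SOURCE A (Python) =====
-- from typing import List, Tuple, Dict
--
-- def java_lcg_forward(seed: int, n: int, skip: int = 0) -> List[int]:
--     """Generate n values from Java LCG with given skip between draws."""
--     MULTIPLIER = 0x5DEECE66D
--     ADDEND     = 0xB
--     MASK       = (1 << 48) - 1
--     MOD        = 1000
--
--     state = (seed ^ MULTIPLIER) & MASK
--     out   = []
--     for _ in range(n):
--         for _ in range(skip):
--             state = (state * MULTIPLIER + ADDEND) & MASK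
--         state = (state * MULTIPLIER + ADDEND) & MASK
--         out.append(int(state >> (48 - 31)) % MOD)
--     return out
-- ===== SOURCE B (Python) =====
-- from typing import List
--
--
-- def java_lcg_forward(seed: int, n: int, skip: int = 0) -> List[int]:
--     """Generate n values from Java LCG with given skip between draws.
--
--     Instead of stepping the LCG skip+1 times per draw, compose the affine
--     step map x -> (M*x + A) & MASK with itself skip+1 times once, by
--     binary exponentiation, and apply the composed map once per draw.
--     """
--     MULTIPLIER = 0x5DEECE66D
--     ADDEND     = 0xB
--     MASK       = (1 << 48) - 1
--     MOD        = 1000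
--
--     e = (skip if skip > 0 else 0) + 1   # steps per draw
--     # (mul, add) = the affine step map composed e times, via squaring
--     mul, add = 1, 0
--     bm, ba = MULTIPLIER, ADDEND
--     k = e
--     while k:
--         if k & 1:
--             mul, add = (bm * mul) & MASK, (bm * add + ba) & MASK
--         bm, ba = (bm * bm) & MASK, (bm * ba + ba) & MASK
--         k >>= 1
--
--     state = (seed ^ MULTIPLIER) & MASK
--     out = []
--     for _ in range(n):
--         state = (mul * state + add) & MASK
--         out.append(int(state >> (48 - 31)) % MOD)
--     return out
-- ===== Notes on version B (the rewrite author's own statement) =====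
-- stated objective: faster
-- what changed: Instead of stepping the LCG skip+1 times for every draw, B composes the affine step map skip+1 times once by binary exponentiation (square-and-multiply on (mul, add) pairs mod 2^48) and applies the composed map once per draw.
import Mathlib
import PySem

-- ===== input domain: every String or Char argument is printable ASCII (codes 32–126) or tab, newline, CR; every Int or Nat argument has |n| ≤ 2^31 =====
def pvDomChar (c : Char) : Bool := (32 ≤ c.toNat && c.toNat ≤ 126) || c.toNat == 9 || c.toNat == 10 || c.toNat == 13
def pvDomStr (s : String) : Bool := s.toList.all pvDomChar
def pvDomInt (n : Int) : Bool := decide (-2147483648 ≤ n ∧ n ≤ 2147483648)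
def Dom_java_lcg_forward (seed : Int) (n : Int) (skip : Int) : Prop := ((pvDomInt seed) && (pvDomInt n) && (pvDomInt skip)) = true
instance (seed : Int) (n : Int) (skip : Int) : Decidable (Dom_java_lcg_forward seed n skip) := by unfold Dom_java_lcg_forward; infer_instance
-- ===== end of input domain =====

-- ===== PORT A =====
-- one honest line: B replaces A's per-draw skip-stepping by a precomposed affine jump map (binary exponentiation); same return value.
-- Python's `&`/`^` on ints are PySem.Int.band/bxor (Python-exact on negatives); `>>` is core Int's `>>>` (floor shift, Python-exact).
-- inner `for _ in range(skip)` loop: runs skip times if skip > 0 else 0 times = skip.toNat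
def aInner (skipN : Nat) (state : Int) : Int :=
  match skipN with
  | 0 => state
  | k + 1 => aInner k (PySem.Int.band (state * 25214903917 + 11) 281474976710655)

-- outer `for _ in range(n)` loop, appending (state >> 17) % 1000 each draw
def aLoop (skipN : Nat) (count : Nat) (state : Int) : List Int :=
  match count with
  | 0 => []
  | k + 1 =>
    let s1 := aInner skipN state
    let s2 := PySem.Int.band (s1 * 25214903917 + 11) 281474976710655
    PySem.Int.mod (s2 >>> 17) 1000 :: aLoop skipN k s2

def java_lcg_forward (seed : Int) (n : Int) (skip : Int) : List Int :=
  aLoop skip.toNat n.toNat (PySem.Int.band (PySem.Int.bxor seed 25214903917) 281474976710655)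

-- ===== PORT B =====
-- affine-map composition mod 2^48: apply p = (p.1, p.2) first, then q
def bComp (p q : Int × Int) : Int × Int :=
  (PySem.Int.band (q.1 * p.1) 281474976710655, PySem.Int.band (q.1 * p.2 + q.2) 281474976710655)

-- `while k:` square-and-multiply loop of Source B ((mul,add) accumulator, (bm,ba) square)
def bPow (k : Nat) (res b : Int × Int) : Int × Int :=
  if k = 0 then res
  else bPow (k / 2) (if k % 2 = 1 then bComp res b else res) (bComp b b)
  termination_by k
  decreasing_by exact Nat.div_lt_self (Nat.pos_of_ne_zero (by assumption)) (by omega)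

-- `for _ in range(n)` loop of Source B: apply the composed map once per draw
def bLoop (mul add : Int) (count : Nat) (state : Int) : List Int :=
  match count with
  | 0 => []
  | k + 1 =>
    let s := PySem.Int.band (mul * state + add) 281474976710655
    PySem.Int.mod (s >>> 17) 1000 :: bLoop mul add k s

def java_lcg_forward_alt (seed : Int) (n : Int) (skip : Int) : List Int :=
  let e : Nat := skip.toNat + 1          -- (skip if skip > 0 else 0) + 1
  let ma := bPow e (1, 0) (25214903917, 11)
  bLoop ma.1 ma.2 n.toNat (PySem.Int.band (PySem.Int.bxor seed 25214903917) 281474976710655)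

-- ===== PRECONDITION & SPEC =====
def Spec_java_lcg_forward (seed : Int) (n : Int) (skip : Int) (out : List Int) : Prop := out = java_lcg_forward_alt seed n skip
instance (seed : Int) (n : Int) (skip : Int) (out : List Int) : Decidable (Spec_java_lcg_forward seed n skip out) := by unfold Spec_java_lcg_forward; infer_instance

-- ===== CLAIM (what is proved, stated in full; the proofs are below) =====
def Claim_equal_java_lcg_forward : Prop := ∀ (seed : Int) (n : Int) (skip : Int), Dom_java_lcg_forward seed n skip → Spec_java_lcg_forward seed n skip (java_lcg_forward seed n skip)

-- ===== LEMMAS AND PROOFS =====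

-- canonical state sequence: k steps of the LCG, all states reduced mod 2^48
def iterStep (k : Nat) (s : Int) : Int :=
  match k with
  | 0 => s % 281474976710656
  | j + 1 => (iterStep j s * 25214903917 + 11) % 281474976710656

-- Python's  x & ((1<<48)-1)  is reduction mod 2^48, for every Int
theorem band_mask (a : Int) :
    PySem.Int.band a 281474976710655 = a % 281474976710656 := by
  unfold PySem.Int.band
  by_cases ha : 0 ≤ a
  · rw [if_pos ha, if_pos (by norm_num),
      show (281474976710655 : Int).toNat = 281474976710655 from rfl,
      Nat.and_two_pow_sub_one_eq_mod a.toNat 48]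
    omega
  · rw [if_neg (by omega), if_pos (by norm_num),
      show (281474976710655 : Int).toNat = 281474976710655 from rfl,
      Nat.and_comm, Nat.and_two_pow_sub_one_eq_mod (-a - 1).toNat 48]
    omega

theorem iter_reduced (k : Nat) (s : Int) :
    iterStep k s % 281474976710656 = iterStep k s := by
  cases k <;> simp [iterStep, Int.emod_emod_of_dvd]

theorem mod_affine (m a s : Int) :
    (m * (s % 281474976710656) + a) % 281474976710656
      = (m * s + a) % 281474976710656 := by
  have hs : Int.ModEq 281474976710656 (s % 281474976710656) s :=
    Int.emod_emod_of_dvd s dvd_rfl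
  exact (hs.mul_left m).add_right a

theorem iter_succ_bottom (k : Nat) (s : Int) :
    iterStep (k + 1) s = iterStep k ((s * 25214903917 + 11) % 281474976710656) := by
  induction k generalizing s with
  | zero =>
    show (s % 281474976710656 * 25214903917 + 11) % 281474976710656
        = (s * 25214903917 + 11) % 281474976710656 % 281474976710656
    rw [Int.emod_emod_of_dvd _ dvd_rfl, mul_comm (s % 281474976710656) 25214903917,
      mod_affine, mul_comm s 25214903917]
  | succ j ih =>
    show (iterStep (j + 1) s * 25214903917 + 11) % 281474976710656 = _
    rw [ih]
    rfl

theorem iter_add (k j : Nat) (s : Int) :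
    iterStep k (iterStep j s) = iterStep (j + k) s := by
  induction k with
  | zero => exact iter_reduced j s
  | succ i ih =>
    show (iterStep i (iterStep j s) * 25214903917 + 11) % 281474976710656 = _
    rw [ih]
    rfl

-- (p.1, p.2) represents the k-fold composed step map, on every input
def Good (k : Nat) (p : Int × Int) : Prop :=
  ∀ s : Int, (p.1 * s + p.2) % 281474976710656 = iterStep k s

theorem good_zero : Good 0 (1, 0) := by
  intro s
  simp [iterStep]

theorem good_base : Good 1 (25214903917, 11) := by
  intro s
  show (25214903917 * s + 11) % 281474976710656
      = (s % 281474976710656 * 25214903917 + 11) % 281474976710656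
  rw [mul_comm (s % 281474976710656) 25214903917, mod_affine]

theorem good_comp {j i : Nat} {p q : Int × Int} (hp : Good j p) (hq : Good i q) :
    Good (j + i) (bComp p q) := by
  intro s
  show (PySem.Int.band (q.1 * p.1) 281474976710655 * s
      + PySem.Int.band (q.1 * p.2 + q.2) 281474976710655) % 281474976710656 = _
  rw [band_mask, band_mask]
  have h1 : (q.1 * p.1 % 281474976710656 * s
      + (q.1 * p.2 + q.2) % 281474976710656) % 281474976710656
      = (q.1 * (p.1 * s + p.2) + q.2) % 281474976710656 := by
    have e0 : Int.ModEq 281474976710656 (q.1 * p.1 % 281474976710656) (q.1 * p.1) :=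
      Int.emod_emod_of_dvd (q.1 * p.1) dvd_rfl
    have e1 := e0.mul_right s
    have e2 : Int.ModEq 281474976710656 ((q.1 * p.2 + q.2) % 281474976710656)
        (q.1 * p.2 + q.2) :=
      Int.emod_emod_of_dvd (q.1 * p.2 + q.2) dvd_rfl
    have h := e1.add e2
    rw [show q.1 * (p.1 * s + p.2) + q.2
        = q.1 * p.1 * s + (q.1 * p.2 + q.2) by ring]
    exact h
  rw [h1, ← mod_affine q.1 q.2 (p.1 * s + p.2), hp s, hq (iterStep j s), iter_add]

theorem bPow_good : ∀ (k : Nat) (res b : Int × Int) (j i : Nat),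
    Good j res → Good i b → Good (j + k * i) (bPow k res b) := by
  intro k
  induction k using Nat.strong_induction_on with
  | _ k ih =>
    intro res b j i hres hb
    rw [bPow]
    by_cases hk : k = 0
    · subst hk
      simpa using hres
    · rw [if_neg hk]
      have hdiv : k / 2 < k := Nat.div_lt_self (Nat.pos_of_ne_zero hk) (by omega)
      by_cases hodd : k % 2 = 1
      · rw [if_pos hodd]
        have := ih (k / 2) hdiv (bComp res b) (bComp b b) (j + i) (i + i)
          (good_comp hres hb) (good_comp hb hb)
        obtain ⟨m, hm⟩ : ∃ m, k = 2 * m + 1 := ⟨k / 2, by omega⟩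
        have hk2 : k / 2 = m := by omega
        have harith : j + i + k / 2 * (i + i) = j + k * i := by
          rw [hk2, hm]; ring
        rwa [harith] at this
      · rw [if_neg hodd]
        have := ih (k / 2) hdiv res (bComp b b) j (i + i) hres (good_comp hb hb)
        obtain ⟨m, hm⟩ : ∃ m, k = 2 * m := ⟨k / 2, by omega⟩
        have hk2 : k / 2 = m := by omega
        have harith : j + k / 2 * (i + i) = j + k * i := by
          rw [hk2, hm]; ring
        rwa [harith] at this

theorem aInner_iter (k : Nat) (s : Int) (hs : s % 281474976710656 = s) :
    aInner k s = iterStep k s := by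
  induction k generalizing s with
  | zero => simpa [aInner, iterStep] using hs.symm
  | succ j ih =>
    show aInner j (PySem.Int.band (s * 25214903917 + 11) 281474976710655) = _
    rw [band_mask, ih _ (Int.emod_emod_of_dvd _ dvd_rfl), ← iter_succ_bottom]

theorem loops_eq (skipN : Nat) (mul add : Int)
    (hgood : Good (skipN + 1) (mul, add)) :
    ∀ (cnt : Nat) (s : Int), s % 281474976710656 = s →
      aLoop skipN cnt s = bLoop mul add cnt s := by
  intro cnt
  induction cnt with
  | zero => intro s _; rfl
  | succ c ih =>
    intro s hs
    show PySem.Int.mod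
        (PySem.Int.band (aInner skipN s * 25214903917 + 11) 281474976710655 >>> 17) 1000
        :: aLoop skipN c (PySem.Int.band (aInner skipN s * 25214903917 + 11) 281474976710655)
      = PySem.Int.mod (PySem.Int.band (mul * s + add) 281474976710655 >>> 17) 1000
        :: bLoop mul add c (PySem.Int.band (mul * s + add) 281474976710655)
    have hA : PySem.Int.band (aInner skipN s * 25214903917 + 11) 281474976710655
        = iterStep (skipN + 1) s := by
      rw [band_mask, aInner_iter skipN s hs]
      rfl
    have hB : PySem.Int.band (mul * s + add) 281474976710655
        = iterStep (skipN + 1) s := by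
      rw [band_mask]
      exact hgood s
    rw [hA, hB, ih _ (iter_reduced (skipN + 1) s)]


-- ===== VERDICT (by name: the statement is the Claim_ definition above) =====
theorem java_lcg_forward_spec : Claim_equal_java_lcg_forward := by
  intro seed n skip _
  show aLoop skip.toNat n.toNat _ = _
  unfold java_lcg_forward_alt
  have hgood : Good (skip.toNat + 1)
      (bPow (skip.toNat + 1) (1, 0) (25214903917, 11)) := by
    have := bPow_good (skip.toNat + 1) (1, 0) (25214903917, 11) 0 1 good_zero good_base
    simpa using this
  have hs : PySem.Int.band (PySem.Int.bxor seed 25214903917) 281474976710655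
      % 281474976710656
      = PySem.Int.band (PySem.Int.bxor seed 25214903917) 281474976710655 := by
    rw [band_mask, Int.emod_emod_of_dvd _ dvd_rfl]
  exact loops_eq skip.toNat _ _ (by simpa using hgood) n.toNat _ hs
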